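-- pv_equiv track=rewrite | github.com/grinic/pymif | pymif/napari/_convert_widget.py | get_n_levels
-- ===== SOURCE A (Python) =====
-- def get_n_levels(dataset_size, axes="tczyx"):
--     """Estimate a default number of pyramid levels from present spatial axes."""
--     axes = str(axes).lower()
--     size_map = dict(zip(axes, dataset_size))
--     shape = [max(1, int(size_map[ax])) for ax in axes if ax in "zyx"]
--     if not shape:
--         return 1
--
--     n = 1
--     while any(s > 2048 for s in shape):
--         n += 1
--         shape = [max(1, s // 2) for s in shape]
--
--     return max(3, n)
-- ===== SOURCE B (Python) =====
-- def get_n_levels(dataset_size, axes="tczyx"):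
--     """Estimate a default number of pyramid levels from present spatial axes."""
--     axes = str(axes).lower()
--     if not any(ax in "zyx" for ax in axes):
--         return 1
--     sizes = [max(1, int(s)) for ax, s in zip(axes, dataset_size) if ax in "zyx"]
--     m = max(sizes, default=1)
--     return max(3, 1 + (m // 2049).bit_length())
-- ===== Notes on version B (the rewrite author's own statement) =====
-- stated objective: simpler
-- what changed: B replaces A's dict-then-repeated-whole-list-halving loop by a single zip pass collecting the spatial sizes and a closed-form bit-length computation on their maximum (level count = max(3, 1 + (m // 2049).bit_length())).
-- outside the precondition, e.g. on get_n_levels([100000, 10], 'zz'): A returns 3, B returns 7; on get_n_levels([], 'z'): A raises KeyError, B returns 3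
import Mathlib
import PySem

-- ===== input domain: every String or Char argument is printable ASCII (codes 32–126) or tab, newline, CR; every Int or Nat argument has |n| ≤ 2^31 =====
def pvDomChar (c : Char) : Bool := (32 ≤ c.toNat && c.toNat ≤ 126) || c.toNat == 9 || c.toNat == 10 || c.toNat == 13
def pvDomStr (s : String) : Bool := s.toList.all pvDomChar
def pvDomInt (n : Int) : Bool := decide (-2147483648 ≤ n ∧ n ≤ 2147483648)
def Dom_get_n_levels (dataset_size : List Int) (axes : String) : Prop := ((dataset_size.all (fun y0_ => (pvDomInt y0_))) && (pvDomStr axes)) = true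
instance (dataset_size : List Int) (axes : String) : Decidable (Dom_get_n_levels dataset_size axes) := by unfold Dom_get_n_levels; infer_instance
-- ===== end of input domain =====

-- B replaces A's repeated list-halving loop by a closed-form bit-length computation on the single
-- maximal spatial size (objective: simpler).

-- ===== PORT A =====
-- Python's `ax in "zyx"` on the single character ax (exact: a length-1 substring test
-- is membership of that character in the string's characters)
def pvSpatial (c : Char) : Bool := ['z', 'y', 'x'].contains c

-- the list comprehension `[max(1, int(size_map[ax])) for ax in axes if ax in "zyx"]`
-- applied to the already-filtered axes; `none` is exactly Python's KeyError
def pvShapeA (d : PySem.Dict Char Int) : List Char → Option (List Int)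
  | [] => some []
  | c :: cs =>
    match d.get? c with
    | none => none
    | some v => (pvShapeA d cs).map (fun l => max 1 v :: l)

-- the `while any(s > 2048 for s in shape)` loop; fuel makes it total: 64 iterations always
-- suffice for the |n| ≤ 2^31 inputs the claims are about
def pvLoopA : Nat → Int → List Int → Int
  | 0, n, _ => n
  | f + 1, n, shape =>
    if shape.any (fun s => decide (2048 < s)) then
      pvLoopA f (n + 1) (shape.map (fun s => max 1 (PySem.Int.floordiv s 2)))
    else n

def get_n_levels (dataset_size : List Int) (axes : String) : Int :=
  match pvShapeA
      ((((PySem.Str.lower axes).toList).zip dataset_size).foldl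
        (fun d p => d.insert p.1 p.2) PySem.Dict.empty)
      (((PySem.Str.lower axes).toList).filter pvSpatial) with
  | none => 0  -- Python raises KeyError here; outside Pre_
  | some shape => if shape.isEmpty then 1 else max 3 (pvLoopA 64 1 shape)

-- ===== PORT B =====
def get_n_levels_alt (dataset_size : List Int) (axes : String) : Int :=
  if !(((PySem.Str.lower axes).toList).any pvSpatial) then 1
  else
    max 3 (1 + (PySem.Int.bitLength (PySem.Int.floordiv
      (PySem.List.maxD
        (((((PySem.Str.lower axes).toList).zip dataset_size).filter
            (fun p => pvSpatial p.1)).map (fun p => max 1 p.2))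
        (fun x => x) 1) 2049) : Int))

-- ===== PRECONDITION & SPEC =====
-- Pre_ excludes (a) inputs where A raises KeyError (a spatial axis character with no occurrence inside
-- the zip range, i.e. no size paired with it) and (b) axes whose spatial characters repeat after
-- lowercasing, where A's dict-reinsertion overwrite makes the chosen size per axis accidental.
def Pre_get_n_levels (dataset_size : List Int) (axes : String) : Prop :=
  let axs := (PySem.Str.lower axes).toList
  (axs.filter pvSpatial).Nodup ∧
    (axs.filter pvSpatial).all (fun c => (axs.take dataset_size.length).contains c) = true

instance (dataset_size : List Int) (axes : String) : Decidable (Pre_get_n_levels dataset_size axes) := by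
  unfold Pre_get_n_levels; infer_instance

def pvWitness_get_n_levels : List Int × String := ([1, 2, 4000, 5000, 6000], "tczyx")

def Spec_get_n_levels (dataset_size : List Int) (axes : String) (out : Int) : Prop := out = get_n_levels_alt dataset_size axes
instance (dataset_size : List Int) (axes : String) (out : Int) : Decidable (Spec_get_n_levels dataset_size axes out) := by unfold Spec_get_n_levels; infer_instance

-- ===== CLAIM (what is proved, stated in full; the proofs are below) =====
def Claim_equal_get_n_levels : Prop := ∀ (dataset_size : List Int) (axes : String), Dom_get_n_levels dataset_size axes → Pre_get_n_levels dataset_size axes → Spec_get_n_levels dataset_size axes (get_n_levels dataset_size axes)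


-- ===== LEMMAS AND PROOFS =====

-- fold of inserts: an absent key leaves the dict unchanged at that key
theorem pv_get_fold_not_mem (zs : List (Char × Int)) (d : PySem.Dict Char Int) (c : Char)
    (h : c ∉ zs.map Prod.fst) :
    (zs.foldl (fun d p => d.insert p.1 p.2) d).get? c = d.get? c := by
  induction zs generalizing d with
  | nil => rfl
  | cons p t ih =>
    simp only [List.map_cons, List.mem_cons, not_or] at h
    simp only [List.foldl_cons]
    rw [ih _ h.2, PySem.Dict.get?_insert_of_ne _ _ h.1]

-- fold of inserts: a key occurring at most once gets its paired value
theorem pv_get_fold_unique (zs : List (Char × Int)) (d : PySem.Dict Char Int) (c : Char) (v : Int)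
    (hcount : (zs.map Prod.fst).count c ≤ 1) (hmem : (c, v) ∈ zs) :
    (zs.foldl (fun d p => d.insert p.1 p.2) d).get? c = some v := by
  induction zs generalizing d with
  | nil => simp at hmem
  | cons p t ih =>
    simp only [List.mem_cons] at hmem
    simp only [List.foldl_cons]
    rcases hmem with h | h
    · subst h
      have hnot : c ∉ t.map Prod.fst := by
        intro hc
        have : 1 ≤ (t.map Prod.fst).count c := List.one_le_count_iff.mpr hc
        simp [List.count_cons_self] at hcount
        omega
      rw [pv_get_fold_not_mem _ _ _ hnot, PySem.Dict.get?_insert_self]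
    · have hne : p.1 ≠ c := by
        intro he
        have h1 : c ∈ t.map Prod.fst := List.mem_map.mpr ⟨(c, v), h, rfl⟩
        have : 1 ≤ (t.map Prod.fst).count c := List.one_le_count_iff.mpr h1
        simp [he] at hcount
        omega
      apply ih
      · simp only [List.map_cons, List.count_cons] at hcount
        omega
      · exact h

-- the comprehension over keys whose lookups all succeed
theorem pv_shape_of_get (d : PySem.Dict Char Int) (l : List (Char × Int))
    (h : ∀ p ∈ l, d.get? p.1 = some p.2) :
    pvShapeA d (l.map Prod.fst) = some (l.map (fun p => max 1 p.2)) := by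
  induction l with
  | nil => rfl
  | cons p t ih =>
    simp only [List.map_cons, pvShapeA]
    rw [h p (List.mem_cons_self), ih (fun q hq => h q (List.mem_cons_of_mem _ hq))]
    rfl

theorem pv_map_fst_zip (l : List Char) (l' : List Int) :
    (l.zip l').map Prod.fst = l.take l'.length := by
  induction l generalizing l' with
  | nil => simp
  | cons a t ih =>
    cases l' with
    | nil => simp
    | cons b t' => simp [ih]

theorem pv_filter_map_fst (p : Char → Bool) (l : List (Char × Int)) :
    (l.map Prod.fst).filter p = (l.filter (fun x => p x.1)).map Prod.fst := by
  induction l with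
  | nil => rfl
  | cons a t ih => by_cases h : p a.1 <;> simp [h, ih]

-- under Pre_, the spatial axes of the whole string are exactly those inside the zip range
theorem pv_filter_take (L : List Char) (n : Nat)
    (hnd : (L.filter pvSpatial).Nodup)
    (hin : ∀ c ∈ L.filter pvSpatial, c ∈ L.take n) :
    L.filter pvSpatial = (L.take n).filter pvSpatial := by
  have hsub : List.Sublist ((L.take n).filter pvSpatial) (L.filter pvSpatial) :=
    (List.take_sublist n L).filter pvSpatial
  have hss : L.filter pvSpatial ⊆ (L.take n).filter pvSpatial := by
    intro c hc
    exact List.mem_filter.mpr ⟨hin c hc, (List.mem_filter.mp hc).2⟩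
  exact (hsub.eq_of_length (le_antisymm hsub.length_le
    (List.subperm_of_subset hnd hss).length_le)).symm

-- the FLOORING HALVING STEP commutes with the binary max
theorem pv_halve_max (a s : Int) :
    max 1 (PySem.Int.floordiv (max a s) 2) =
      max (max 1 (PySem.Int.floordiv a 2)) (max 1 (PySem.Int.floordiv s 2)) := by
  have hmono : ∀ x y : Int, x ≤ y → PySem.Int.floordiv x 2 ≤ PySem.Int.floordiv y 2 := by
    intro x y hxy
    rw [PySem.Int.floordiv_eq_ediv_of_pos (by norm_num),
        PySem.Int.floordiv_eq_ediv_of_pos (by norm_num)]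
    omega
  rcases le_total a s with h | h
  · rw [max_eq_right h, max_eq_right (max_le_max le_rfl (hmono a s h))]
  · rw [max_eq_left h, max_eq_left (max_le_max le_rfl (hmono s a h))]

-- the halving step maps the running max of the list to the halved max
theorem pv_foldl_halve (shape : List Int) (a : Int) :
    (shape.map (fun s => max 1 (PySem.Int.floordiv s 2))).foldl max
        (max 1 (PySem.Int.floordiv a 2)) =
      max 1 (PySem.Int.floordiv (shape.foldl max a) 2) := by
  induction shape generalizing a with
  | nil => rfl
  | cons s t ih =>
    simp only [List.map_cons, List.foldl_cons]
    rw [← pv_halve_max, ih]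

-- the loop's result as a bit length of the running max, given enough fuel
theorem pv_loop_eq (f : Nat) (n : Int) (shape : List Int)
    (hM : shape.foldl max 1 < 2 ^ (11 + f)) :
    pvLoopA f n shape =
      n + (PySem.Int.bitLength (PySem.Int.floordiv (shape.foldl max 1) 2049) : Int) := by
  induction f generalizing n shape with
  | zero =>
    have h1 : 1 ≤ shape.foldl max 1 := (PySem.List.le_foldl_max shape 1).1
    have h2 : (2 : Int) ^ (11 + 0) = 2048 := by norm_num
    rw [h2] at hM
    have hfd : PySem.Int.floordiv (shape.foldl max 1) 2049 = 0 := by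
      rw [PySem.Int.floordiv_eq_ediv_of_pos (by norm_num)]
      omega
    rw [hfd]
    simp [pvLoopA, PySem.Int.bitLength_zero]
  | succ f ih =>
    by_cases hany : shape.any (fun s => decide (2048 < s)) = true
    · have h1 : 1 ≤ shape.foldl max 1 := (PySem.List.le_foldl_max shape 1).1
      have hbig : 2048 < shape.foldl max 1 := by
        rw [List.any_eq_true] at hany
        obtain ⟨s, hs, hgt⟩ := hany
        simp only [decide_eq_true_eq] at hgt
        exact lt_of_lt_of_le hgt ((PySem.List.le_foldl_max shape 1).2 s hs)
      simp only [pvLoopA, hany, if_true]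
      have hstep : (shape.map (fun s => max 1 (PySem.Int.floordiv s 2))).foldl max 1 =
          max 1 (PySem.Int.floordiv (shape.foldl max 1) 2) := by
        have := pv_foldl_halve shape 1
        simpa using this
      have hhalf : max 1 (PySem.Int.floordiv (shape.foldl max 1) 2) =
          PySem.Int.floordiv (shape.foldl max 1) 2 := by
        rw [PySem.Int.floordiv_eq_ediv_of_pos (by norm_num)]
        rw [max_eq_right]
        omega
      have hpow : (2 : Int) ^ (11 + (f + 1)) = 2 ^ (11 + f) * 2 := by
        rw [show 11 + (f + 1) = (11 + f) + 1 by omega, pow_succ]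
      rw [hpow] at hM
      rw [ih (n + 1) _ (by
        rw [hstep, hhalf, PySem.Int.floordiv_eq_ediv_of_pos (by norm_num)]
        omega)]
      rw [hstep, hhalf]
      have hpos : 0 < PySem.Int.floordiv (shape.foldl max 1) 2049 := by
        rw [PySem.Int.floordiv_eq_ediv_of_pos (by norm_num)]
        omega
      rw [PySem.Int.bitLength_of_pos hpos]
      have hcomm : PySem.Int.floordiv (PySem.Int.floordiv (shape.foldl max 1) 2049) 2 =
          PySem.Int.floordiv (PySem.Int.floordiv (shape.foldl max 1) 2) 2049 := by
        rw [PySem.Int.floordiv_eq_ediv_of_pos (show (0:Int) < 2049 by norm_num),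
            PySem.Int.floordiv_eq_ediv_of_pos (show (0:Int) < 2 by norm_num),
            PySem.Int.floordiv_eq_ediv_of_pos (show (0:Int) < 2 by norm_num),
            PySem.Int.floordiv_eq_ediv_of_pos (show (0:Int) < 2049 by norm_num)]
        rw [Int.ediv_ediv_of_nonneg (by norm_num), Int.ediv_ediv_of_nonneg (by norm_num),
          mul_comm]
      rw [hcomm]
      push_cast
      ring
    · rw [Bool.not_eq_true] at hany
      have h1 : 1 ≤ shape.foldl max 1 := (PySem.List.le_foldl_max shape 1).1
      have hsmall : shape.foldl max 1 ≤ 2048 := by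
        rcases PySem.List.foldl_max_mem shape 1 with h | h
        · omega
        · rw [List.any_eq_false] at hany
          have := hany _ h
          simp only [decide_eq_true_eq] at this
          omega
      have hfd : PySem.Int.floordiv (shape.foldl max 1) 2049 = 0 := by
        rw [PySem.Int.floordiv_eq_ediv_of_pos (by norm_num)]
        omega
      rw [hfd]
      simp [pvLoopA, hany, PySem.Int.bitLength_zero]

-- ===== VERDICT (by name: the statement is the Claim_ definition above) =====
theorem get_n_levels_spec : Claim_equal_get_n_levels := by
  intro ds axes hdom hpre
  unfold Spec_get_n_levels get_n_levels get_n_levels_alt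
  obtain ⟨hnd, hin'⟩ := hpre
  have hin : ∀ c ∈ ((PySem.Str.lower axes).toList).filter pvSpatial,
      c ∈ ((PySem.Str.lower axes).toList).take ds.length := by
    intro c hc
    have h := List.all_eq_true.mp hin' c hc
    simpa using h
  set L := (PySem.Str.lower axes).toList with hL
  -- spatial axes = first components of the spatially filtered zip
  have hF : L.filter pvSpatial = ((L.zip ds).filter (fun p => pvSpatial p.1)).map Prod.fst := by
    rw [← pv_filter_map_fst, pv_map_fst_zip]
    exact pv_filter_take L ds.length hnd hin
  -- each spatial pair's key occurs at most once among the zip keys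
  have hcnt : ∀ p ∈ (L.zip ds).filter (fun p => pvSpatial p.1),
      ((L.zip ds).map Prod.fst).count p.1 ≤ 1 := by
    intro p hp
    have hsp : pvSpatial p.1 = true := by
      have := (List.mem_filter.mp hp).2
      simpa using this
    have hle1 : ((L.zip ds).map Prod.fst).count p.1 ≤ L.count p.1 := by
      rw [pv_map_fst_zip]
      exact (List.take_sublist _ _).count_le p.1
    have heq : L.count p.1 = (L.filter pvSpatial).count p.1 := by
      simp [List.count_filter, hsp]
    have := List.nodup_iff_count_le_one.mp hnd p.1
    omega
  -- hence the dict lookup of each spatial pair succeeds with its own value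
  have hget : ∀ p ∈ (L.zip ds).filter (fun p => pvSpatial p.1),
      ((L.zip ds).foldl (fun d p => d.insert p.1 p.2) PySem.Dict.empty).get? p.1 = some p.2 := by
    intro p hp
    exact pv_get_fold_unique (L.zip ds) _ p.1 p.2 (hcnt p hp) (List.mem_of_mem_filter hp)
  have hshape : pvShapeA ((L.zip ds).foldl (fun d p => d.insert p.1 p.2) PySem.Dict.empty)
      (L.filter pvSpatial) =
      some (((L.zip ds).filter (fun p => pvSpatial p.1)).map (fun p => max 1 p.2)) := by
    rw [hF]
    exact pv_shape_of_get _ _ hget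
  rw [hshape]
  -- both sides branch on the presence of spatial axes
  by_cases hany : L.any pvSpatial = true
  · -- some spatial axis exists: the filtered zip is nonempty
    set sizes := ((L.zip ds).filter (fun p => pvSpatial p.1)).map (fun p => max 1 p.2)
      with hsizes
    have hne : sizes ≠ [] := by
      obtain ⟨c, hc, hsp⟩ := List.any_eq_true.mp hany
      have hcmem : c ∈ ((L.zip ds).filter (fun p => pvSpatial p.1)).map Prod.fst := by
        rw [← hF]; exact List.mem_filter.mpr ⟨hc, hsp⟩
      rw [hsizes]
      simp only [ne_eq, List.map_eq_nil_iff]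
      intro hnil
      rw [hnil] at hcmem
      simp at hcmem
    change (if sizes.isEmpty = true then (1 : Int) else max 3 (pvLoopA 64 1 sizes)) = _
    rw [if_neg (show ¬ (sizes.isEmpty = true) from by simpa [List.isEmpty_iff] using hne),
        if_neg (show ¬ ((!(L.any pvSpatial)) = true) from by simp [hany])]
    have hall1 : ∀ s ∈ sizes, 1 ≤ s := by
      intro s hs
      rw [hsizes] at hs
      obtain ⟨p, _, rfl⟩ := List.mem_map.mp hs
      exact le_max_left 1 p.2
    have hmaxD : PySem.List.maxD sizes (fun x => x) 1 = sizes.foldl max 1 := by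
      cases hcase : sizes with
      | nil => exact absurd hcase hne
      | cons x t =>
        unfold PySem.List.maxD
        rw [PySem.List.max?_id_cons]
        simp only [Option.getD_some, List.foldl_cons]
        rw [max_eq_right (hall1 x (by rw [hcase]; exact List.mem_cons_self))]
    rw [hmaxD]
    -- the running max is bounded by 2^31 < 2^(11+64) thanks to Dom
    have hbound : sizes.foldl max 1 < 2 ^ (11 + 64) := by
      have hsz : ∀ s ∈ sizes, s ≤ 2147483648 := by
        intro s hs
        rw [hsizes] at hs
        obtain ⟨p, hp, rfl⟩ := List.mem_map.mp hs
        have hpd : p.2 ∈ ds := (List.of_mem_zip (List.mem_of_mem_filter hp)).2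
        unfold Dom_get_n_levels at hdom
        simp only [Bool.and_eq_true, List.all_eq_true] at hdom
        have hv := hdom.1 p.2 hpd
        unfold pvDomInt at hv
        simp only [decide_eq_true_eq] at hv
        omega
      rcases PySem.List.foldl_max_mem sizes 1 with h | h
      · rw [h]; norm_num
      · have := hsz _ h
        have : sizes.foldl max 1 ≤ 2147483648 := by omega
        calc sizes.foldl max 1 ≤ 2147483648 := this
          _ < 2 ^ (11 + 64) := by norm_num
    rw [pv_loop_eq 64 1 sizes hbound]
  · -- no spatial axis: both return 1
    have hnil : ((L.zip ds).filter (fun p => pvSpatial p.1)).map (fun p => max 1 p.2) = [] := by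
      rw [List.map_eq_nil_iff, ← List.map_eq_nil_iff (f := Prod.fst), ← hF,
          List.filter_eq_nil_iff]
      intro c hc hsp
      exact hany (List.any_eq_true.mpr ⟨c, hc, hsp⟩)
    rw [Bool.not_eq_true] at hany
    simp [hany, hnil]
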